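-- pv_equiv track=rewrite | github.com/ankul-in/Two-years | KATA377.py | alternate_sq_sum
-- ===== SOURCE A (Python) =====
-- def alternate_sq_sum(arr):
--     answer=[]
--     for i,j in enumerate(arr):
--         if i%2!=0:
--             answer.append(j**2)
--         else:
--             answer.append(j)
--     return sum(answer)
-- ===== SOURCE B (Python) =====
-- def alternate_sq_sum(arr):
--     total = 0
--     i = 0
--     n = len(arr)
--     while i + 1 < n:
--         total += arr[i] + arr[i + 1] ** 2
--         i += 2
--     if i < n:
--         total += arr[i]
--     return total
-- ===== Notes on version B (the rewrite author's own statement) =====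
-- stated objective: simpler
-- what changed: Replaces the enumerate-and-test pass that builds an intermediate answer list (then sums it) with a single pairwise index loop accumulating the total directly, two elements per step with no parity test and no intermediate list.
import Mathlib
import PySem

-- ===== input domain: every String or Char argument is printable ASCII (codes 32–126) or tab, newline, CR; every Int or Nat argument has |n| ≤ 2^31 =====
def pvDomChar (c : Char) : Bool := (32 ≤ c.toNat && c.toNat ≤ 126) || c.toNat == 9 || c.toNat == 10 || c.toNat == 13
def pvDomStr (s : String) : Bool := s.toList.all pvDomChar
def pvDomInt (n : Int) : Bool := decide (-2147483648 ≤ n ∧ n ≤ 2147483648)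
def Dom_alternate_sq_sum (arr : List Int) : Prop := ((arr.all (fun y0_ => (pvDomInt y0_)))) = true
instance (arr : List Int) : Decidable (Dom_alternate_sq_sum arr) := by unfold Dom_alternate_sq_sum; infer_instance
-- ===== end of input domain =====

-- B replaces A's enumerate-and-test pass building an intermediate list with one pairwise
-- index loop accumulating the total directly (objective: simpler).

-- ===== PORT A =====
def alternate_sq_sum (arr : List Int) : Int :=
  ((PySem.List.enumerate arr 0).foldl
      (fun answer ij =>
        if ij.1 % 2 ≠ 0 then answer ++ [ij.2 ^ 2] else answer ++ [ij.2])
      []).sum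

-- ===== PORT B =====
-- the while-loop of Source B: i advances by 2; total accumulates arr[i] + arr[i+1]**2
def alternate_sq_sum_altLoop (arr : List Int) (n i : Nat) (total : Int) : Int :=
  if i + 1 < n then
    alternate_sq_sum_altLoop arr n (i + 2)
      (total + PySem.List.pyGetD arr (i : Int) 0 + (PySem.List.pyGetD arr ((i : Int) + 1) 0) ^ 2)
  else if i < n then total + PySem.List.pyGetD arr (i : Int) 0
  else total
termination_by n - i

def alternate_sq_sum_alt (arr : List Int) : Int :=
  alternate_sq_sum_altLoop arr arr.length 0 0

-- ===== PRECONDITION & SPEC =====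
def Spec_alternate_sq_sum (arr : List Int) (out : Int) : Prop := out = alternate_sq_sum_alt arr
instance (arr : List Int) (out : Int) : Decidable (Spec_alternate_sq_sum arr out) := by unfold Spec_alternate_sq_sum; infer_instance

-- ===== CLAIM (what is proved, stated in full; the proofs are below) =====
def Claim_equal_alternate_sq_sum : Prop := ∀ (arr : List Int), Dom_alternate_sq_sum arr → Spec_alternate_sq_sum arr (alternate_sq_sum arr)

-- ===== LEMMAS AND PROOFS =====

-- common reference value: sum two elements at a time, squaring the second of each pair
def pvPairSum : List Int → Int
  | [] => 0
  | [x] => x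
  | x :: y :: r => x + y ^ 2 + pvPairSum r

theorem pvA_eq_pairSum : ∀ (arr : List Int) (s : Int) (acc : List Int), s % 2 = 0 →
    ((PySem.List.enumerate arr s).foldl
        (fun answer ij =>
          if ij.1 % 2 ≠ 0 then answer ++ [ij.2 ^ 2] else answer ++ [ij.2])
        acc).sum = acc.sum + pvPairSum arr
  | [], s, acc, _ => by simp [PySem.List.enumerate_nil, pvPairSum]
  | [x], s, acc, h => by
      simp [PySem.List.enumerate_cons, PySem.List.enumerate_nil, pvPairSum, h]
  | x :: y :: r, s, acc, h => by
      have h1 : (s + 1) % 2 ≠ 0 := by omega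
      have h2 : (s + 2) % 2 = 0 := by omega
      simp only [PySem.List.enumerate_cons, List.foldl_cons, ne_eq, h, h1,
        not_true_eq_false, not_false_eq_true, ite_true, ite_false]
      rw [pvA_eq_pairSum r (s + 1 + 1) _ (by omega)]
      simp [pvPairSum]
      ring

theorem pvB_eq_pairSum (arr : List Int) : ∀ (r : List Int) (i : Nat) (total : Int),
    arr.drop i = r →
    alternate_sq_sum_altLoop arr arr.length i total = total + pvPairSum r
  | [], i, total, hd => by
      have hlen : arr.length ≤ i := by
        have := congrArg List.length hd; simp at this; omega
      unfold alternate_sq_sum_altLoop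
      simp [pvPairSum, Nat.not_lt.mpr hlen, show ¬ (i + 1 < arr.length) by omega]
  | [x], i, total, hd => by
      have hlen : arr.length = i + 1 := by
        have := congrArg List.length hd; simp at this; omega
      have hx : arr[i]? = some x := by
        have : (arr.drop i)[0]? = some x := by rw [hd]; rfl
        simpa using this
      have gx : arr.getD i 0 = x := by rw [List.getD_eq_getElem?_getD, hx]; rfl
      unfold alternate_sq_sum_altLoop
      rw [if_neg (by omega), if_pos (by omega), PySem.List.pyGetD_natCast, gx]
      simp [pvPairSum]
  | x :: y :: r, i, total, hd => by
      have hlen : arr.length = i + 2 + r.length := by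
        have := congrArg List.length hd; simp at this; omega
      have hx : arr[i]? = some x := by
        have : (arr.drop i)[0]? = some x := by rw [hd]; rfl
        simpa using this
      have hy : arr[i + 1]? = some y := by
        have : (arr.drop i)[1]? = some y := by rw [hd]; rfl
        simpa using this
      have hd2 : arr.drop (i + 2) = r := by
        have : (arr.drop i).drop 2 = r := by rw [hd]; rfl
        simpa [List.drop_drop, Nat.add_comm] using this
      unfold alternate_sq_sum_altLoop
      have hcond : i + 1 < arr.length := by omega
      rw [if_pos hcond, pvB_eq_pairSum arr r (i + 2) _ hd2]
      have gx : arr.getD i 0 = x := by rw [List.getD_eq_getElem?_getD, hx]; rfl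
      have gy : arr.getD (i + 1) 0 = y := by rw [List.getD_eq_getElem?_getD, hy]; rfl
      have hcast : ((i : Int) + 1) = ((i + 1 : Nat) : Int) := by push_cast; ring
      rw [hcast, PySem.List.pyGetD_natCast, PySem.List.pyGetD_natCast, gx, gy]
      simp [pvPairSum]
      ring

-- ===== VERDICT (by name: the statement is the Claim_ definition above) =====
theorem alternate_sq_sum_spec : Claim_equal_alternate_sq_sum := by
  intro arr _
  unfold Spec_alternate_sq_sum alternate_sq_sum alternate_sq_sum_alt
  rw [pvA_eq_pairSum arr 0 [] rfl, pvB_eq_pairSum arr arr 0 0 (by simp)]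
  simp
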